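-- pv_equiv track=rewrite | github.com/firef1i/gentok | etoken_monitor.py | _find_matching_token_index
-- ===== SOURCE A (Python) =====
-- STATUS_PROCESSING = "processing"
--
-- def _find_matching_token_index(tokens, token_data):
--     """Find the newest token row we should update instead of appending."""
--     for idx in range(len(tokens) - 1, -1, -1):
--         record = tokens[idx]
--         if record.get("truck_no") != token_data.get("truck_no"):
--             continue
--         if record.get("material") != token_data.get("material"):
--             continue
--
--         incoming_entry = token_data.get("entry_record") or ""
--         existing_entry = record.get("entry_record") or ""
--         if incoming_entry and existing_entry and incoming_entry == existing_entry:
--             return idx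
--
--         if record.get("status") == STATUS_PROCESSING or not record.get("token"):
--             return idx
--     return None
-- ===== SOURCE B (Python) =====
-- STATUS_PROCESSING = "processing"
--
-- def _find_matching_token_index(tokens, token_data):
--     """Forward single pass keeping the last qualifying index (no backward scan)."""
--     result = None
--     for idx, record in enumerate(tokens):
--         if record.get("truck_no") != token_data.get("truck_no"):
--             continue
--         if record.get("material") != token_data.get("material"):
--             continue
--         incoming_entry = token_data.get("entry_record") or ""
--         existing_entry = record.get("entry_record") or ""
--         if (incoming_entry and existing_entry and incoming_entry == existing_entry) \
--                 or record.get("status") == STATUS_PROCESSING or not record.get("token"):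
--             result = idx
--     return result
-- ===== Notes on version B (the rewrite author's own statement) =====
-- stated objective: alternative
-- what changed: Replaced the backward index scan with early return by a forward enumerate pass that keeps the last qualifying index in an accumulator and returns it after the loop.
import Mathlib
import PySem

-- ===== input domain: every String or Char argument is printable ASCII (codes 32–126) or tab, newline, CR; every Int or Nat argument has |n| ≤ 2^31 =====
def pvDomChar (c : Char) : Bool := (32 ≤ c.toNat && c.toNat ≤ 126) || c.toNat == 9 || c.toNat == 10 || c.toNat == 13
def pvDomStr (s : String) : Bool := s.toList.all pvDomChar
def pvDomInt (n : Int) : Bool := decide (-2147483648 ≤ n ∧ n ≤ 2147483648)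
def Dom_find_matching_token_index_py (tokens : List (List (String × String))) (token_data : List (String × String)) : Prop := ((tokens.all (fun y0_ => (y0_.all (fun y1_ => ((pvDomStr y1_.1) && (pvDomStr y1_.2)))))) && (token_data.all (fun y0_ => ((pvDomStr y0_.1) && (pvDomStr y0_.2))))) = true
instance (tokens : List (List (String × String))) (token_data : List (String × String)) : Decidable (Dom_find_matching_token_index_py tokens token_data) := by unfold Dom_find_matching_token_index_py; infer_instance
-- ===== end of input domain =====

-- B replaces A's backward early-return index scan with a forward enumerate pass that keeps
-- the last qualifying index in an accumulator (alternative decomposition; same O(n) cost).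

-- ===== PORT A =====
def pvStatusProcessing : String := "processing"

-- dict.get(k): first-match lookup on the association list (exact: Python dicts have unique keys)
def pvDget (d : List (String × String)) (k : String) : Option String := List.lookup k d

-- the 'for idx in range(len(tokens)-1, -1, -1)' loop body, with early return
def pvALoop (tokens : List (List (String × String))) (token_data : List (String × String)) : List Int → Option Int
  | [] => none
  | idx :: rest =>
    match PySem.List.pyGet? tokens idx with
    | none => none   -- IndexError; unreachable: idx is always in range
    | some record =>
      if pvDget record "truck_no" ≠ pvDget token_data "truck_no" then pvALoop tokens token_data rest
      else if pvDget record "material" ≠ pvDget token_data "material" then pvALoop tokens token_data rest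
      else
        -- `x or ""`: the only falsy str is "", so this is getD "" (exact)
        let incoming := (pvDget token_data "entry_record").getD ""
        let existing := (pvDget record "entry_record").getD ""
        if incoming ≠ "" ∧ existing ≠ "" ∧ incoming = existing then some idx
        -- `not record.get("token")`: None or "" (exact: getD "" = "")
        else if pvDget record "status" = some pvStatusProcessing ∨ (pvDget record "token").getD "" = "" then some idx
        else pvALoop tokens token_data rest

def find_matching_token_index_py (tokens : List (List (String × String))) (token_data : List (String × String)) : Option Int :=
  pvALoop tokens token_data (PySem.List.pyRange ((tokens.length : Int) - 1) (-1) (-1))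

-- ===== PORT B =====
def find_matching_token_index_py_alt (tokens : List (List (String × String))) (token_data : List (String × String)) : Option Int :=
  (PySem.List.enumerate tokens).foldl
    (fun result p =>
      if pvDget p.2 "truck_no" ≠ pvDget token_data "truck_no" then result
      else if pvDget p.2 "material" ≠ pvDget token_data "material" then result
      else
        let incoming := (pvDget token_data "entry_record").getD ""
        let existing := (pvDget p.2 "entry_record").getD ""
        if (incoming ≠ "" ∧ existing ≠ "" ∧ incoming = existing) ∨
            pvDget p.2 "status" = some pvStatusProcessing ∨ (pvDget p.2 "token").getD "" = "" then some p.1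
        else result)
    none

-- ===== PRECONDITION & SPEC =====
def Spec_find_matching_token_index_py (tokens : List (List (String × String))) (token_data : List (String × String)) (out : Option Int) : Prop := out = find_matching_token_index_py_alt tokens token_data
instance (tokens : List (List (String × String))) (token_data : List (String × String)) (out : Option Int) : Decidable (Spec_find_matching_token_index_py tokens token_data out) := by unfold Spec_find_matching_token_index_py; infer_instance

-- ===== CLAIM (what is proved, stated in full; the proofs are below) =====
def Claim_equal_find_matching_token_index_py : Prop := ∀ (tokens : List (List (String × String))) (token_data : List (String × String)), Dom_find_matching_token_index_py tokens token_data → Spec_find_matching_token_index_py tokens token_data (find_matching_token_index_py tokens token_data)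

-- ===== LEMMAS AND PROOFS =====

-- the common per-record qualifying condition
abbrev pvQ (token_data record : List (String × String)) : Prop :=
  pvDget record "truck_no" = pvDget token_data "truck_no" ∧
  pvDget record "material" = pvDget token_data "material" ∧
  (((pvDget token_data "entry_record").getD "" ≠ "" ∧ (pvDget record "entry_record").getD "" ≠ "" ∧
      (pvDget token_data "entry_record").getD "" = (pvDget record "entry_record").getD "") ∨
    pvDget record "status" = some pvStatusProcessing ∨ (pvDget record "token").getD "" = "")

-- appending a record does not change A's loop on indices that stay inside ts
lemma pvALoop_stable (ts : List (List (String × String))) (r : List (String × String))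
    (td : List (String × String)) (idxs : List Int)
    (h : ∀ i ∈ idxs, 0 ≤ i ∧ i < (ts.length : Int)) :
    pvALoop (ts ++ [r]) td idxs = pvALoop ts td idxs := by
  induction idxs with
  | nil => rfl
  | cons i rest ih =>
    have hi := h i (List.mem_cons_self ..)
    have hget : PySem.List.pyGet? (ts ++ [r]) i = PySem.List.pyGet? ts i := by
      rw [PySem.List.pyGet?_of_nonneg _ hi.1, PySem.List.pyGet?_of_nonneg _ hi.1]
      have hlt : i.toNat < ts.length := by omega
      rw [List.getElem?_append_left hlt]
    have ih' := ih (fun j hj => h j (List.mem_cons_of_mem _ hj))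
    simp only [pvALoop, hget]
    cases PySem.List.pyGet? ts i with
    | none => rfl
    | some record => simp only [ih']

-- one backward step of A, phrased forward
lemma pvA_step (ts : List (List (String × String))) (r : List (String × String))
    (td : List (String × String)) :
    find_matching_token_index_py (ts ++ [r]) td =
      if pvQ td r then some (ts.length : Int) else find_matching_token_index_py ts td := by
  unfold find_matching_token_index_py
  have hlen : (((ts ++ [r]).length : Int) - 1) = (ts.length : Int) := by
    simp [List.length_append]
  rw [hlen, PySem.List.pyRange_neg_one_cons (by omega : (-1 : Int) < (ts.length : Int))]
  have hget : PySem.List.pyGet? (ts ++ [r]) (ts.length : Int) = some r := by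
    simpa using PySem.List.pyGet?_append_length (pre := ts) (y := r) (ys := [])
  have hstab : pvALoop (ts ++ [r]) td (PySem.List.pyRange ((ts.length : Int) - 1) (-1) (-1)) =
      pvALoop ts td (PySem.List.pyRange ((ts.length : Int) - 1) (-1) (-1)) := by
    apply pvALoop_stable
    intro i hi
    rw [PySem.List.mem_pyRange_neg_one] at hi
    omega
  simp only [pvALoop, hget, hstab, pvQ]
  split_ifs <;> first | rfl | tauto

-- one forward step of B
lemma pvB_step (ts : List (List (String × String))) (r : List (String × String))
    (td : List (String × String)) :
    find_matching_token_index_py_alt (ts ++ [r]) td =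
      if pvQ td r then some (ts.length : Int) else find_matching_token_index_py_alt ts td := by
  unfold find_matching_token_index_py_alt
  rw [PySem.List.enumerate_append, List.foldl_append]
  simp only [PySem.List.enumerate_cons, PySem.List.enumerate_nil, List.foldl_cons, List.foldl_nil,
    Int.zero_add, pvQ]
  split_ifs <;> first | rfl | tauto

-- the equivalence itself, unconditionally
lemma pv_main (tokens : List (List (String × String))) (token_data : List (String × String)) :
    find_matching_token_index_py tokens token_data = find_matching_token_index_py_alt tokens token_data := by
  induction tokens using List.reverseRecOn with
  | nil =>
    simp [find_matching_token_index_py, find_matching_token_index_py_alt,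
      PySem.List.pyRange_neg_one_eq_nil, pvALoop, PySem.List.enumerate_nil]
  | append_singleton ts r ih =>
    rw [pvA_step, pvB_step, ih]

-- ===== VERDICT (by name: the statement is the Claim_ definition above) =====
theorem find_matching_token_index_py_spec : Claim_equal_find_matching_token_index_py := by
  intro tokens token_data _
  exact pv_main tokens token_data
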